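-- pv_equiv track=rewrite | github.com/jotatito05/Validador-de-Contrase-as | utils.py | detectar_secuencia_alfabetica
-- ===== SOURCE A (Python) =====
-- def detectar_secuencia_alfabetica(texto):
--     """
--     Detecta secuencias alfabéticas comunes en el texto (ej: abc, xyz, def).
--
--     Args:
--         texto (str): El texto a verificar
--
--     Returns:
--         bool: True si se detecta una secuencia alfabética, False en caso contrario
--     """
--     texto_lower = texto.lower()
--
--     # Buscar secuencias ascendentes de 3 o más letras consecutivas
--     for i in range(len(texto_lower) - 2):
--         if texto_lower[i:i+3].isalpha():
--             chars = [ord(texto_lower[i+j]) for j in range(3)]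
--             if chars[1] == chars[0] + 1 and chars[2] == chars[1] + 1:
--                 return True
--
--     # Buscar secuencias descendentes
--     for i in range(len(texto_lower) - 2):
--         if texto_lower[i:i+3].isalpha():
--             chars = [ord(texto_lower[i+j]) for j in range(3)]
--             if chars[1] == chars[0] - 1 and chars[2] == chars[1] - 1:
--                 return True
--
--     return False
-- ===== SOURCE B (Python) =====
-- def detectar_secuencia_alfabetica(texto):
--     # Single-pass run-length scan: keeps ascending/descending run counters instead of
--     # two separate 3-char-window passes.
--     t = texto.lower()
--     if not t:
--         return False
--     prev = t[0]
--     asc = 1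
--     desc = 1
--     for ch in t[1:]:
--         asc = asc + 1 if prev.isalpha() and ch.isalpha() and ord(ch) == ord(prev) + 1 else 1
--         desc = desc + 1 if prev.isalpha() and ch.isalpha() and ord(ch) == ord(prev) - 1 else 1
--         if asc >= 3 or desc >= 3:
--             return True
--         prev = ch
--     return False
-- ===== Notes on version B (the rewrite author's own statement) =====
-- stated objective: alternative
-- what changed: Replaced A's two separate 3-char sliding-window passes (ascending then descending) by one single-pass run-length state machine that maintains ascending and descending run counters and returns as soon as either run reaches 3.
import Mathlib
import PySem

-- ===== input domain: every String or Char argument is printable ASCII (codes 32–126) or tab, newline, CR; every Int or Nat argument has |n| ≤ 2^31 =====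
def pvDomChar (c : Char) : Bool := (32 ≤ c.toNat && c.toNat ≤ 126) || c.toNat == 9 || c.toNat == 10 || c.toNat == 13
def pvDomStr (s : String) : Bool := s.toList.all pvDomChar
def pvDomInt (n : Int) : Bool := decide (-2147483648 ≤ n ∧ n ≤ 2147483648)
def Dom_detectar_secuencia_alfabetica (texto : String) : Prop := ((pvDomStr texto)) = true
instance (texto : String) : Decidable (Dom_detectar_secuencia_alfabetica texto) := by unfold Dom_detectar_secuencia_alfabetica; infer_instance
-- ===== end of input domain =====

-- B replaces A's two 3-char sliding-window passes by one single-pass run-length state machine (alternative decomposition, same return value).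

-- ===== PORT A =====
def detectar_secuencia_alfabetica (texto : String) : Bool :=
  let tl := PySem.Str.lower texto
  let n : Int := PySem.Str.len tl
  -- first loop: ascending windows (early 'return True' = any)
  ((PySem.List.pyRange 0 (n - 2) 1).any fun i =>
      if PySem.Str.strIsalpha (PySem.Str.slice tl (some i) (some (i + 3))) then
        match PySem.Str.pyGet? tl i, PySem.Str.pyGet? tl (i + 1), PySem.Str.pyGet? tl (i + 2) with
        | some c0, some c1, some c2 =>
            ((c1.toNat : Int) == (c0.toNat : Int) + 1) && ((c2.toNat : Int) == (c1.toNat : Int) + 1)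
        | _, _, _ => false   -- unreachable: i+2 < n, IndexError impossible
      else false)
  ||
  -- second loop: descending windows
  ((PySem.List.pyRange 0 (n - 2) 1).any fun i =>
      if PySem.Str.strIsalpha (PySem.Str.slice tl (some i) (some (i + 3))) then
        match PySem.Str.pyGet? tl i, PySem.Str.pyGet? tl (i + 1), PySem.Str.pyGet? tl (i + 2) with
        | some c0, some c1, some c2 =>
            ((c1.toNat : Int) == (c0.toNat : Int) - 1) && ((c2.toNat : Int) == (c1.toNat : Int) - 1)
        | _, _, _ => false
      else false)

-- ===== PORT B =====
-- prev.isalpha() and ch.isalpha() and ord(ch) == ord(prev) + 1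
def pvPaB (prev c : Char) : Bool :=
  PySem.Chars.isalpha prev && PySem.Chars.isalpha c && ((c.toNat : Int) == (prev.toNat : Int) + 1)
-- prev.isalpha() and ch.isalpha() and ord(ch) == ord(prev) - 1
def pvPdB (prev c : Char) : Bool :=
  PySem.Chars.isalpha prev && PySem.Chars.isalpha c && ((c.toNat : Int) == (prev.toNat : Int) - 1)

-- the 'for ch in t[1:]' loop with state (prev, asc, desc) and early return
def pvScanB (prev : Char) (asc desc : Nat) : List Char → Bool
  | [] => false
  | c :: rest =>
      let asc' := if pvPaB prev c then asc + 1 else 1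
      let desc' := if pvPdB prev c then desc + 1 else 1
      if 3 ≤ asc' ∨ 3 ≤ desc' then true else pvScanB c asc' desc' rest

def detectar_secuencia_alfabetica_alt (texto : String) : Bool :=
  match (PySem.Str.lower texto).toList with
  | [] => false
  | c :: rest => pvScanB c 1 1 rest

-- ===== PRECONDITION & SPEC =====
def Spec_detectar_secuencia_alfabetica (texto : String) (out : Bool) : Prop := out = detectar_secuencia_alfabetica_alt texto
instance (texto : String) (out : Bool) : Decidable (Spec_detectar_secuencia_alfabetica texto out) := by unfold Spec_detectar_secuencia_alfabetica; infer_instance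

-- ===== CLAIM (what is proved, stated in full; the proofs are below) =====
def Claim_equal_detectar_secuencia_alfabetica : Prop := ∀ (texto : String), Dom_detectar_secuencia_alfabetica texto → Spec_detectar_secuencia_alfabetica texto (detectar_secuencia_alfabetica texto)

-- ===== LEMMAS AND PROOFS =====

-- window-at-index predicates (ascending / descending triple starting at position k)
def upAt (l : List Char) (k : Nat) : Bool :=
  match l.drop k with
  | a :: b :: c :: _ => pvPaB a b && pvPaB b c
  | _ => false

def downAt (l : List Char) (k : Nat) : Bool :=
  match l.drop k with
  | a :: b :: c :: _ => pvPdB a b && pvPdB b c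
  | _ => false

-- structural triple-scan forms
def triUp : List Char → Bool
  | a :: b :: c :: r => (pvPaB a b && pvPaB b c) || triUp (b :: c :: r)
  | _ => false

def triDown : List Char → Bool
  | a :: b :: c :: r => (pvPdB a b && pvPdB b c) || triDown (b :: c :: r)
  | _ => false

def tri : List Char → Bool
  | a :: b :: c :: r => ((pvPaB a b && pvPaB b c) || (pvPdB a b && pvPdB b c)) || tri (b :: c :: r)
  | _ => false

theorem tri_eq (l : List Char) : tri l = (triUp l || triDown l) := by
  fun_induction tri l with
  | case1 a b c r ih =>
      simp only [tri, triUp, triDown, ih]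
      cases pvPaB a b && pvPaB b c <;> cases pvPdB a b && pvPdB b c <;>
        cases triUp (b :: c :: r) <;> cases triDown (b :: c :: r) <;> rfl
  | case2 l h => cases l with
    | nil => simp [tri, triUp, triDown]
    | cons a t => cases t with
      | nil => simp [tri, triUp, triDown]
      | cons b t' => cases t' with
        | nil => simp [tri, triUp, triDown]
        | cons c r => exact absurd rfl (h a b c r)

-- ===== B-side characterization =====
def scan2 (prev : Char) (ua ud : Bool) : List Char → Bool
  | [] => false
  | c :: rest => (ua && pvPaB prev c) || (ud && pvPdB prev c) || scan2 c (pvPaB prev c) (pvPdB prev c) rest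

theorem scan_eq_scan2 (l : List Char) : ∀ (prev : Char) (asc desc : Nat), 1 ≤ asc → 1 ≤ desc →
    pvScanB prev asc desc l = scan2 prev (decide (2 ≤ asc)) (decide (2 ≤ desc)) l := by
  induction l with
  | nil => intro prev asc desc _ _; simp [pvScanB, scan2]
  | cons c rest ih =>
      intro prev asc desc ha hd
      rcases Bool.eq_false_or_eq_true (pvPaB prev c) with hpa | hpa <;>
        rcases Bool.eq_false_or_eq_true (pvPdB prev c) with hpd | hpd <;>
        simp only [pvScanB, scan2, hpa, hpd, Bool.false_eq_true, if_true, if_false,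
          Bool.true_and, Bool.and_true, Bool.and_false, Bool.false_and,
          Bool.false_or, Bool.or_false]
      -- hpa = true, hpd = true
      · split_ifs with h
        · rcases (by omega : 2 ≤ asc ∨ 2 ≤ desc) with h2 | h2 <;> simp [h2]
        · rw [ih c (asc + 1) (desc + 1) (by omega) (by omega)]
          have h2 : ¬ (2 ≤ asc) := by omega
          have h3 : ¬ (2 ≤ desc) := by omega
          have h4 : 2 ≤ asc + 1 := by omega
          have h5 : 2 ≤ desc + 1 := by omega
          simp [h2, h3, h4, h5]
      -- hpa = true, hpd = false
      · split_ifs with h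
        · have h2 : 2 ≤ asc := by omega
          simp [h2]
        · rw [ih c (asc + 1) 1 (by omega) (by omega)]
          have h2 : ¬ (2 ≤ asc) := by omega
          have h3 : 2 ≤ asc + 1 := by omega
          simp [h2, h3]
      -- hpa = false, hpd = true
      · split_ifs with h
        · have h2 : 2 ≤ desc := by omega
          simp [h2]
        · rw [ih c 1 (desc + 1) (by omega) (by omega)]
          have h2 : ¬ (2 ≤ desc) := by omega
          have h3 : 2 ≤ desc + 1 := by omega
          simp [h2, h3]
      -- hpa = false, hpd = false
      · rw [if_neg (by omega : ¬ ((3:Nat) ≤ 1 ∨ (3:Nat) ≤ 1))]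
        rw [ih c 1 1 (by omega) (by omega)]; norm_num

theorem scan2_tri (l : List Char) : ∀ (a b : Char), scan2 b (pvPaB a b) (pvPdB a b) l = tri (a :: b :: l) := by
  induction l with
  | nil => intro a b; simp [scan2, tri]
  | cons c rest ih =>
      intro a b
      simp only [scan2, tri, ih b c]

theorem scan2_false (l : List Char) (c : Char) : scan2 c false false l = tri (c :: l) := by
  cases l with
  | nil => simp [scan2, tri]
  | cons d rest => simp [scan2, scan2_tri rest c d]

theorem alt_eq_tri (texto : String) :
    detectar_secuencia_alfabetica_alt texto = tri (PySem.Str.lower texto).toList := by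
  unfold detectar_secuencia_alfabetica_alt
  cases h : (PySem.Str.lower texto).toList with
  | nil => simp [tri]
  | cons c rest =>
      show pvScanB c 1 1 rest = tri (c :: rest)
      have hs := scan_eq_scan2 rest c 1 1 (by omega) (by omega)
      norm_num at hs
      rw [hs, scan2_false]

-- ===== A-side characterization =====

theorem upAt_succ (x : Char) (t : List Char) (k : Nat) : upAt (x :: t) (k + 1) = upAt t k := by
  simp [upAt]

theorem downAt_succ (x : Char) (t : List Char) (k : Nat) : downAt (x :: t) (k + 1) = downAt t k := by
  simp [downAt]

theorem upAt_bound {l : List Char} {k : Nat} (h : upAt l k = true) : k + 2 < l.length := by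
  unfold upAt at h
  have hlen := List.length_drop (l := l) (i := k)
  rcases hd : l.drop k with _ | ⟨a, _ | ⟨b, _ | ⟨c, r⟩⟩⟩ <;> rw [hd] at h hlen <;>
    simp at h hlen <;> omega

theorem downAt_bound {l : List Char} {k : Nat} (h : downAt l k = true) : k + 2 < l.length := by
  unfold downAt at h
  have hlen := List.length_drop (l := l) (i := k)
  rcases hd : l.drop k with _ | ⟨a, _ | ⟨b, _ | ⟨c, r⟩⟩⟩ <;> rw [hd] at h hlen <;>
    simp at h hlen <;> omega

theorem triUp_iff (l : List Char) : triUp l = true ↔ ∃ k, upAt l k = true := by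
  fun_induction triUp l with
  | case1 a b c r ih =>
      simp only [triUp, Bool.or_eq_true, ih]
      constructor
      · rintro (h | ⟨k, hk⟩)
        · exact ⟨0, by simpa [upAt] using h⟩
        · exact ⟨k + 1, by rwa [upAt_succ]⟩
      · rintro ⟨k, hk⟩
        cases k with
        | zero => exact Or.inl (by simpa [upAt] using hk)
        | succ k => exact Or.inr ⟨k, by rwa [upAt_succ] at hk⟩
  | case2 l h =>
      have hlen : l.length < 3 := by
        by_contra hge
        push_neg at hge
        rcases l with _ | ⟨a, _ | ⟨b, _ | ⟨c, r⟩⟩⟩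
        · simp at hge
        · simp at hge
        · simp at hge
        · exact h a b c r rfl
      constructor
      · intro hf
        exfalso
        rcases l with _ | ⟨a, _ | ⟨b, _ | ⟨c, r⟩⟩⟩
        · simp [triUp] at hf
        · simp [triUp] at hf
        · simp [triUp] at hf
        · exact h a b c r rfl
      · rintro ⟨k, hk⟩
        exact absurd (upAt_bound hk) (by omega)

theorem triDown_iff (l : List Char) : triDown l = true ↔ ∃ k, downAt l k = true := by
  fun_induction triDown l with
  | case1 a b c r ih =>
      simp only [triDown, Bool.or_eq_true, ih]
      constructor
      · rintro (h | ⟨k, hk⟩)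
        · exact ⟨0, by simpa [downAt] using h⟩
        · exact ⟨k + 1, by rwa [downAt_succ]⟩
      · rintro ⟨k, hk⟩
        cases k with
        | zero => exact Or.inl (by simpa [downAt] using hk)
        | succ k => exact Or.inr ⟨k, by rwa [downAt_succ] at hk⟩
  | case2 l h =>
      have hlen : l.length < 3 := by
        by_contra hge
        push_neg at hge
        rcases l with _ | ⟨a, _ | ⟨b, _ | ⟨c, r⟩⟩⟩
        · simp at hge
        · simp at hge
        · simp at hge
        · exact h a b c r rfl
      constructor
      · intro hf
        exfalso
        rcases l with _ | ⟨a, _ | ⟨b, _ | ⟨c, r⟩⟩⟩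
        · simp [triDown] at hf
        · simp [triDown] at hf
        · simp [triDown] at hf
        · exact h a b c r rfl
      · rintro ⟨k, hk⟩
        exact absurd (downAt_bound hk) (by omega)

theorem bool_window (a b c e1 e2 : Bool) :
    (if (a && (b && (c && true))) = true then e1 && e2 else false)
      = ((a && b && e1) && (b && c && e2)) := by
  cases a <;> cases b <;> cases c <;> cases e1 <;> cases e2 <;> rfl

-- the window body of A's loops, evaluated at an in-range index
theorem drop_three {l : List Char} {k : Nat} (h : k + 2 < l.length) :
    l.drop k = l[k] :: l[k+1] :: l[k+2] :: l.drop (k + 3) := by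
  rw [List.drop_eq_getElem_cons (by omega), List.drop_eq_getElem_cons (by omega),
      List.drop_eq_getElem_cons (by omega)]

theorem bodyUp_eq (l : List Char) (k : Nat) (h : k + 2 < l.length) :
    (if PySem.Chars.strIsalpha (PySem.List.slice l (some (k : Int)) (some ((k : Int) + 3))) then
        match PySem.List.pyGet? l (k : Int), PySem.List.pyGet? l ((k : Int) + 1), PySem.List.pyGet? l ((k : Int) + 2) with
        | some c0, some c1, some c2 =>
            ((c1.toNat : Int) == (c0.toNat : Int) + 1) && ((c2.toNat : Int) == (c1.toNat : Int) + 1)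
        | _, _, _ => false
      else false) = upAt l k := by
  have h1 : ((k : Int) + 1) = ((k + 1 : Nat) : Int) := by push_cast; ring
  have h2 : ((k : Int) + 2) = ((k + 2 : Nat) : Int) := by push_cast; ring
  have h3 : ((k : Int) + 3) = ((k + 3 : Nat) : Int) := by push_cast; ring
  rw [h1, h2, h3, PySem.List.slice_natCast]
  have hd := drop_three h
  rw [hd]
  have ht : (k + 3) - k = 3 := by omega
  rw [ht]
  simp only [List.take_succ_cons, List.take_zero]
  rw [PySem.List.pyGet?_natCast, PySem.List.pyGet?_natCast, PySem.List.pyGet?_natCast,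
      List.getElem?_eq_getElem (by omega), List.getElem?_eq_getElem (by omega),
      List.getElem?_eq_getElem (by omega)]
  unfold upAt
  rw [hd]
  simp only [PySem.Chars.strIsalpha, List.all_cons, List.all_nil, List.isEmpty_cons,
    Bool.not_false, Bool.true_and]
  rw [bool_window]
  simp [pvPaB]

theorem bodyDown_eq (l : List Char) (k : Nat) (h : k + 2 < l.length) :
    (if PySem.Chars.strIsalpha (PySem.List.slice l (some (k : Int)) (some ((k : Int) + 3))) then
        match PySem.List.pyGet? l (k : Int), PySem.List.pyGet? l ((k : Int) + 1), PySem.List.pyGet? l ((k : Int) + 2) with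
        | some c0, some c1, some c2 =>
            ((c1.toNat : Int) == (c0.toNat : Int) - 1) && ((c2.toNat : Int) == (c1.toNat : Int) - 1)
        | _, _, _ => false
      else false) = downAt l k := by
  have h1 : ((k : Int) + 1) = ((k + 1 : Nat) : Int) := by push_cast; ring
  have h2 : ((k : Int) + 2) = ((k + 2 : Nat) : Int) := by push_cast; ring
  have h3 : ((k : Int) + 3) = ((k + 3 : Nat) : Int) := by push_cast; ring
  rw [h1, h2, h3, PySem.List.slice_natCast]
  have hd := drop_three h
  rw [hd]
  have ht : (k + 3) - k = 3 := by omega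
  rw [ht]
  simp only [List.take_succ_cons, List.take_zero]
  rw [PySem.List.pyGet?_natCast, PySem.List.pyGet?_natCast, PySem.List.pyGet?_natCast,
      List.getElem?_eq_getElem (by omega), List.getElem?_eq_getElem (by omega),
      List.getElem?_eq_getElem (by omega)]
  unfold downAt
  rw [hd]
  simp only [PySem.Chars.strIsalpha, List.all_cons, List.all_nil, List.isEmpty_cons,
    Bool.not_false, Bool.true_and]
  rw [bool_window]
  simp [pvPdB]

theorem anyUp_eq (l : List Char) :
    ((PySem.List.pyRange 0 ((l.length : Int) - 2) 1).any fun i =>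
      if PySem.Chars.strIsalpha (PySem.List.slice l (some i) (some (i + 3))) then
        match PySem.List.pyGet? l i, PySem.List.pyGet? l (i + 1), PySem.List.pyGet? l (i + 2) with
        | some c0, some c1, some c2 =>
            ((c1.toNat : Int) == (c0.toNat : Int) + 1) && ((c2.toNat : Int) == (c1.toNat : Int) + 1)
        | _, _, _ => false
      else false) = triUp l := by
  rw [PySem.List.pyRange_one, List.any_map]
  have hm : (((l.length : Int) - 2) - 0).toNat = l.length - 2 := by omega
  rw [hm, Bool.eq_iff_iff, List.any_eq_true, triUp_iff]
  constructor
  · rintro ⟨k, hk, hbody⟩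
    simp only [Function.comp, zero_add] at hbody
    rw [List.mem_range] at hk
    exact ⟨k, by rw [← bodyUp_eq l k (by omega)]; exact hbody⟩
  · rintro ⟨k, hk⟩
    have hb := upAt_bound hk
    refine ⟨k, List.mem_range.mpr (by omega), ?_⟩
    simp only [Function.comp, zero_add]
    rw [bodyUp_eq l k (by omega)]
    exact hk

theorem anyDown_eq (l : List Char) :
    ((PySem.List.pyRange 0 ((l.length : Int) - 2) 1).any fun i =>
      if PySem.Chars.strIsalpha (PySem.List.slice l (some i) (some (i + 3))) then
        match PySem.List.pyGet? l i, PySem.List.pyGet? l (i + 1), PySem.List.pyGet? l (i + 2) with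
        | some c0, some c1, some c2 =>
            ((c1.toNat : Int) == (c0.toNat : Int) - 1) && ((c2.toNat : Int) == (c1.toNat : Int) - 1)
        | _, _, _ => false
      else false) = triDown l := by
  rw [PySem.List.pyRange_one, List.any_map]
  have hm : (((l.length : Int) - 2) - 0).toNat = l.length - 2 := by omega
  rw [hm, Bool.eq_iff_iff, List.any_eq_true, triDown_iff]
  constructor
  · rintro ⟨k, hk, hbody⟩
    simp only [Function.comp, zero_add] at hbody
    rw [List.mem_range] at hk
    exact ⟨k, by rw [← bodyDown_eq l k (by omega)]; exact hbody⟩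
  · rintro ⟨k, hk⟩
    have hb := downAt_bound hk
    refine ⟨k, List.mem_range.mpr (by omega), ?_⟩
    simp only [Function.comp, zero_add]
    rw [bodyDown_eq l k (by omega)]
    exact hk

theorem a_eq_tri (texto : String) :
    detectar_secuencia_alfabetica texto = tri (PySem.Str.lower texto).toList := by
  rw [tri_eq]
  simp only [detectar_secuencia_alfabetica, PySem.Str.strIsalpha_eq, PySem.Str.toList_slice,
    PySem.Str.pyGet?_eq, PySem.Chars.pyGet?_eq_listPyGet?, PySem.Chars.slice_eq_listSlice,
    PySem.Str.len, PySem.Chars.len_eq]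
  rw [anyUp_eq, anyDown_eq]

-- ===== VERDICT (by name: the statement is the Claim_ definition above) =====
theorem detectar_secuencia_alfabetica_spec : Claim_equal_detectar_secuencia_alfabetica := by
  intro texto _
  unfold Spec_detectar_secuencia_alfabetica
  rw [a_eq_tri, alt_eq_tri]
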